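-- pv_equiv track=rewrite | github.com/sammcj/sync-agentic-tools | src/sync_agentic_tools/special_files.py | _compute_traversal_paths
-- ===== SOURCE A (Python) =====
-- def _compute_traversal_paths(include_keys: list[str]) -> tuple[set[str], set[str]]:
--     """Compute include paths and traversal paths from a list of include keys."""
--     include_paths = set(include_keys)
--     traversal_paths: set[str] = set()
--     for path in include_paths:
--         parts = path.split(".")
--         for i in range(len(parts) - 1):
--             traversal_paths.add(".".join(parts[: i + 1]))
--     return include_paths, traversal_paths
-- ===== SOURCE B (Python) =====
-- def _compute_traversal_paths(include_keys: list[str]) -> tuple[set[str], set[str]]: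
--     """Compute include paths and traversal paths from a list of include keys."""
--     include_paths = set(include_keys)
--     traversal_paths: set[str] = set()
--     for path in include_paths:
--         # single left-to-right character scan: at each '.' the prefix read so far
--         # is a traversal path; the full path itself is never added
--         prefix: list[str] = []
--         for ch in path:
--             if ch == ".":
--                 traversal_paths.add("".join(prefix))
--             prefix.append(ch)
--     return include_paths, traversal_paths
-- ===== Notes on version B (the rewrite author's own statement) =====
-- stated objective: alternative
-- what changed: Replaces split-into-parts plus a nested index loop that re-joins a slice of parts for every prefix by a single left-to-right character scan that emits the accumulated prefix at each dot.
import Mathlib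
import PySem

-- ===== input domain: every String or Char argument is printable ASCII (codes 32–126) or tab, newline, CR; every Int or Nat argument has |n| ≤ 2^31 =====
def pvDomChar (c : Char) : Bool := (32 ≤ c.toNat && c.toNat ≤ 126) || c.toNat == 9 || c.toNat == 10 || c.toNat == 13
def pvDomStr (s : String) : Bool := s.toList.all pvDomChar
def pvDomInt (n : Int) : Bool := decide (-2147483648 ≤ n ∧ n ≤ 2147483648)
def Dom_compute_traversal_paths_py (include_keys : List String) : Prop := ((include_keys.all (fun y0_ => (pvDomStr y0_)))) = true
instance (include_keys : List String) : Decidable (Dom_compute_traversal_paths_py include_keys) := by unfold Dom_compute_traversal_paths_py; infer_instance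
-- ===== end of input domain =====

-- B replaces A's split-into-parts plus nested index loop (re-joining a slice of the parts
-- for every prefix) by a single left-to-right character scan that emits the accumulated
-- prefix at each '.'; A is total and equivalence is proved on all inputs.

-- ===== PORT A =====
def compute_traversal_paths_py (include_keys : List String) : List String × List String :=
  let include_paths : PySem.Set String := PySem.Set.ofList include_keys
  let traversal_paths : PySem.Set String :=
    include_paths.foldl (fun tp path =>
      -- parts = path.split("."); split? is 'some' since the separator "." is nonempty
      let parts : List String := (PySem.Str.split? path ".").getD []
      (PySem.List.pyRange 0 ((parts.length : Int) - 1)).foldl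
        (fun tp i =>
          PySem.Set.add tp (PySem.Str.join "." (PySem.List.slice parts none (some (i + 1)))))
        tp)
      PySem.Set.empty
  (include_paths, traversal_paths)

-- ===== PORT B =====
def compute_traversal_paths_py_alt (include_keys : List String) : List String × List String :=
  let include_paths : PySem.Set String := PySem.Set.ofList include_keys
  let traversal_paths : PySem.Set String :=
    include_paths.foldl (fun tp path =>
      -- one scan over the characters: state = (traversal set so far, prefix chars so far)
      (path.toList.foldl
        (fun (st : PySem.Set String × List Char) ch =>
          ((if ch = '.' then PySem.Set.add st.1 (String.ofList st.2) else st.1), st.2 ++ [ch]))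
        (tp, [])).1)
      PySem.Set.empty
  (include_paths, traversal_paths)

-- ===== PRECONDITION & SPEC =====
def Spec_compute_traversal_paths_py (include_keys : List String) (out : List String × List String) : Prop := out = compute_traversal_paths_py_alt include_keys
instance (include_keys : List String) (out : List String × List String) : Decidable (Spec_compute_traversal_paths_py include_keys out) := by unfold Spec_compute_traversal_paths_py; infer_instance

-- ===== CLAIM (what is proved, stated in full; the proofs are below) =====
def Claim_equal_compute_traversal_paths_py : Prop := ∀ (include_keys : List String), Dom_compute_traversal_paths_py include_keys → Spec_compute_traversal_paths_py include_keys (compute_traversal_paths_py include_keys)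

-- ===== LEMMAS AND PROOFS =====

-- accumulator-style split on '.': pvMySplit q cs = the parts of (q ++ cs), the part
-- currently being read being q
def pvMySplit : List Char → List Char → List (List Char)
  | q, [] => [q]
  | q, c :: cs => if c = '.' then q :: pvMySplit [] cs else pvMySplit (q ++ [c]) cs

-- the dotted proper prefixes A joins from a parts list, the already-consumed text in front
def pvPrefixes : List Char → List (List Char) → List (List Char)
  | _, [] => []
  | _, [_] => []
  | pref, p :: q :: rest => (pref ++ p) :: pvPrefixes (pref ++ p ++ ['.']) (q :: rest)

-- the prefixes B's character scan emits, the already-scanned text in front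
def pvBPrefs : List Char → List Char → List (List Char)
  | _, [] => []
  | pref, c :: cs =>
      if c = '.' then pref :: pvBPrefs (pref ++ [c]) cs else pvBPrefs (pref ++ [c]) cs

theorem pvMySplit_ne_nil (q cs) : pvMySplit q cs ≠ [] := by
  induction cs generalizing q with
  | nil => simp [pvMySplit]
  | cons c cs ih =>
    by_cases hc : c = '.'
    · simp [pvMySplit, hc]
    · simpa [pvMySplit, hc] using ih (q ++ [c])

theorem pv_go_spec : ∀ (fuel : Nat) (cs q : List Char) (accs : List (List Char)),
    cs.length < fuel →
    PySem.Chars.splitOn.go ['.'] fuel cs q accs = accs.reverse ++ pvMySplit q.reverse cs := by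
  intro fuel
  induction fuel with
  | zero => intro cs q accs h; omega
  | succ fuel ih =>
    intro cs q accs h
    cases cs with
    | nil => simp [PySem.Chars.splitOn.go, pvMySplit]
    | cons c rest =>
      by_cases hc : c = '.'
      · subst hc
        have hstep : PySem.Chars.splitOn.go ['.'] (fuel + 1) ('.' :: rest) q accs
            = PySem.Chars.splitOn.go ['.'] fuel rest [] (q.reverse :: accs) := by
          simp [PySem.Chars.splitOn.go, List.isPrefixOf]
        rw [hstep, ih rest [] (q.reverse :: accs) (by simp at h; omega)]
        simp [pvMySplit]
      · have hstep : PySem.Chars.splitOn.go ['.'] (fuel + 1) (c :: rest) q accs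
            = PySem.Chars.splitOn.go ['.'] fuel rest (c :: q) accs := by
          simp [PySem.Chars.splitOn.go, List.isPrefixOf]
          intro hcc; exact absurd hcc.symm hc
        rw [hstep, ih rest (c :: q) accs (by simp at h; omega)]
        simp [pvMySplit, hc]

theorem pv_splitOn_eq (cs : List Char) : PySem.Chars.splitOn cs ['.'] = pvMySplit [] cs := by
  unfold PySem.Chars.splitOn
  rw [pv_go_spec (cs.length + 1) cs [] [] (by omega)]
  simp

theorem pv_parts_eq (path : String) :
    (PySem.Str.split? path ".").getD [] = (pvMySplit [] path.toList).map String.ofList := by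
  have hdot : ("." : String).toList = ['.'] := rfl
  simp [PySem.Str.split?, PySem.Chars.split?, hdot, pv_splitOn_eq]

theorem pv_G_B : ∀ (cs pref q : List Char),
    pvBPrefs (pref ++ q) cs = pvPrefixes pref (pvMySplit q cs) := by
  intro cs
  induction cs with
  | nil => intro pref q; simp [pvBPrefs, pvMySplit, pvPrefixes]
  | cons c cs ih =>
    intro pref q
    by_cases hc : c = '.'
    · subst hc
      have hih := ih (pref ++ q ++ ['.']) []
      rw [List.append_nil] at hih
      obtain ⟨m, M, hM⟩ := List.exists_cons_of_ne_nil (pvMySplit_ne_nil ([] : List Char) cs)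
      rw [List.append_assoc] at hih
      rw [hM] at hih
      simp [pvBPrefs, pvMySplit, hM, pvPrefixes, List.append_assoc, hih]
    · have hih := ih pref (q ++ [c])
      simp only [pvBPrefs, pvMySplit, if_neg hc]
      simpa [List.append_assoc] using hih

theorem pv_intercalate_cons_cons (a b : List Char) (l : List (List Char)) :
    List.intercalate ['.'] (a :: b :: l) = a ++ '.' :: List.intercalate ['.'] (b :: l) := by
  simp [List.intercalate, List.intersperse]

theorem pv_G_A : ∀ (M : List (List Char)) (pref : List Char), M ≠ [] →
    (List.range (M.length - 1)).map
      (fun n => pref ++ List.intercalate ['.'] (M.take (n + 1))) = pvPrefixes pref M := by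
  intro M
  induction M with
  | nil => intro pref h; exact absurd rfl h
  | cons p M ih =>
    intro pref _
    cases M with
    | nil => simp [pvPrefixes]
    | cons r rs =>
      have hlen : (p :: r :: rs).length - 1 = rs.length + 1 := by simp
      rw [hlen, List.range_succ_eq_map, List.map_cons, List.map_map]
      have htail : ∀ n ∈ List.range rs.length,
          ((fun n => pref ++ List.intercalate ['.'] ((p :: r :: rs).take (n + 1))) ∘ Nat.succ) n
          = (fun n => (pref ++ p ++ ['.']) ++ List.intercalate ['.'] ((r :: rs).take (n + 1))) n := by
        intro n _
        simp only [Function.comp, List.take_succ_cons, pv_intercalate_cons_cons]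
        simp [List.append_assoc]
      rw [List.map_congr_left htail]
      have hih := ih (pref ++ p ++ ['.']) (by simp)
      simp only [List.length_cons, Nat.add_sub_cancel] at hih
      rw [hih]
      simp [pvPrefixes, List.intercalate]

theorem pv_B_scan : ∀ (cs : List Char) (tp : PySem.Set String) (pref : List Char),
    (cs.foldl
      (fun (st : PySem.Set String × List Char) ch =>
        ((if ch = '.' then PySem.Set.add st.1 (String.ofList st.2) else st.1), st.2 ++ [ch]))
      (tp, pref)).1
    = (pvBPrefs pref cs).foldl (fun t p => PySem.Set.add t (String.ofList p)) tp := by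
  intro cs
  induction cs with
  | nil => intro tp pref; simp [pvBPrefs]
  | cons c cs ih =>
    intro tp pref
    by_cases hc : c = '.'
    · subst hc
      simp only [List.foldl_cons, pvBPrefs]
      exact ih _ _
    · simp only [List.foldl_cons, pvBPrefs, if_neg hc]
      exact ih _ _

theorem pv_join_take (M : List (List Char)) (n : Nat) :
    PySem.Str.join "." ((M.map String.ofList).take (n + 1))
      = String.ofList (List.intercalate ['.'] (M.take (n + 1))) := by
  apply String.toList_inj.mp
  rw [PySem.Str.toList_join, ← List.map_take, List.map_map]
  have hdot : ("." : String).toList = ['.'] := rfl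
  simp [PySem.Chars.join, hdot, Function.comp_def]

theorem pv_inner_eq (tp : PySem.Set String) (path : String) :
    ((PySem.List.pyRange 0 ((((PySem.Str.split? path ".").getD []).length : Int) - 1)).foldl
        (fun t i => PySem.Set.add t
          (PySem.Str.join "." (PySem.List.slice ((PySem.Str.split? path ".").getD []) none (some (i + 1)))))
        tp)
    = (path.toList.foldl
        (fun (st : PySem.Set String × List Char) ch =>
          ((if ch = '.' then PySem.Set.add st.1 (String.ofList st.2) else st.1), st.2 ++ [ch]))
        (tp, [])).1 := by
  rw [pv_B_scan]
  have hB : pvBPrefs [] path.toList = pvPrefixes [] (pvMySplit [] path.toList) := by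
    simpa using pv_G_B path.toList [] []
  rw [hB, pv_parts_eq]
  set M := pvMySplit [] path.toList with hMdef
  have hMne : M ≠ [] := pvMySplit_ne_nil _ _
  have h1 : 1 ≤ M.length := by
    have := List.length_pos_of_ne_nil hMne
    omega
  have hlen : (((M.map String.ofList).length : Int) - 1) = ((M.length - 1 : Nat) : Int) := by
    simp; omega
  rw [hlen, PySem.List.pyRange_zero_natCast, List.foldl_map]
  have hbody : ∀ (t : PySem.Set String), ∀ n ∈ List.range (M.length - 1),
      PySem.Set.add t (PySem.Str.join "."
          (PySem.List.slice (M.map String.ofList) none (some ((n : Int) + 1))))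
      = PySem.Set.add t
          (String.ofList ([] ++ List.intercalate ['.'] (M.take (n + 1)))) := by
    intro t n _
    have hc : ((n : Int) + 1) = ((n + 1 : Nat) : Int) := by push_cast; ring
    rw [hc, PySem.List.slice_to_natCast, pv_join_take]
    simp
  rw [PySem.List.foldl_congr_mem _ _ _ _ hbody]
  rw [← pv_G_A M [] hMne, List.foldl_map]

-- ===== VERDICT (by name: the statement is the Claim_ definition above) =====
theorem compute_traversal_paths_py_spec : Claim_equal_compute_traversal_paths_py := by
  intro ks _
  unfold Spec_compute_traversal_paths_py
  simp only [compute_traversal_paths_py, compute_traversal_paths_py_alt]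
  refine congrArg _ ?_
  exact PySem.List.foldl_congr_mem _ _ _ _ (fun acc x _ => pv_inner_eq acc x)
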